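-- pv_equiv track=rewrite | github.com/TheNova6000/Pyone | interpreter.py | preprocess_expression
-- ===== SOURCE A (Python) =====
-- def preprocess_expression(expression):
--     placeholders = {}
--     result = ""
--     i = 0
--     counter = 0
--
--     while i < len(expression):
--         ch = expression[i]
--
--
--         # start of string literal
--         if ch == '"' or ch == "'":
--             quote = ch
--             i += 1
--             start = i
--
--             while i < len(expression) and expression[i] != quote:
--                 i += 1
--
--             if i >= len(expression):
--                 raise SyntaxError("Unterminated string literal")
--
--             value = expression[start:i]
--             key = f"__STR{counter}__"
--             placeholders[key] = value
--             result += key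
--             counter += 1
--             i += 1  # skip closing quote
--
--         else:
--             result += ch
--             i += 1
--     replacements = [
--         ("is greater than or equal to", ">="),
--         ("is less than or equal to", "<="),
--         ("is greater than", ">"),
--         ("is less than", "<"),
--         ("is equals to", "=="),]
--
--     for phrase, symbol in replacements:
--         result = result.replace(phrase, symbol)
--
--     return result, placeholders
-- ===== SOURCE B (Python) =====
-- _REPLACEMENTS = [
--     ("is greater than or equal to", ">="),
--     ("is less than or equal to", "<="),
--     ("is greater than", ">"),
--     ("is less than", "<"),
--     ("is equals to", "=="),
-- ]
--
--
-- def preprocess_expression(expression):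
--     # jump from quote to quote with str.find instead of scanning char by char
--     pieces = []
--     pairs = []
--     rest = expression
--     while True:
--         d = rest.find('"')
--         s = rest.find("'")
--         if d == -1 and s == -1:
--             break
--         if s == -1 or (d != -1 and d < s):
--             j, quote = d, '"'
--         else:
--             j, quote = s, "'"
--         tail = rest[j + 1:]
--         k = tail.find(quote)
--         if k == -1:
--             raise SyntaxError("Unterminated string literal")
--         key = "__STR%d__" % len(pairs)
--         pieces += [rest[:j], key]
--         pairs.append((key, tail[:k]))
--         rest = tail[k + 1:]
--     pieces.append(rest)
--     result = "".join(pieces)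
--     for phrase, symbol in _REPLACEMENTS:
--         result = result.replace(phrase, symbol)
--     return result, dict(pairs)
-- ===== Notes on version B (the rewrite author's own statement) =====
-- stated objective: faster
-- what changed: A scans character by character with a manual index loop, growing the result string one character at a time; B jumps from quote to quote with str.find, slices out each literal and the text between literals in one step, collects the pieces in a list joined once at the end, and builds the placeholder dict from a pair list.
import Mathlib
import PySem

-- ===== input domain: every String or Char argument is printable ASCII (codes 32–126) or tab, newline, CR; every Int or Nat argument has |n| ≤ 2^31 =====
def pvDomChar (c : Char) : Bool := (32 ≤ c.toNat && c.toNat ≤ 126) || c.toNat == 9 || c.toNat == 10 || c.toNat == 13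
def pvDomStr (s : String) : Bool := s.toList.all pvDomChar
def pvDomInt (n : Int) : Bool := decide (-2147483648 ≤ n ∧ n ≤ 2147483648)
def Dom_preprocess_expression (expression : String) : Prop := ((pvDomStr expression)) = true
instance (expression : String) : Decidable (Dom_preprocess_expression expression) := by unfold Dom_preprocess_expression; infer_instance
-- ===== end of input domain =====

-- B replaces A's char-by-char index loop and one-character-at-a-time string growth by
-- find-driven jumps from quote to quote with a single join at the end (objective: faster;
-- a timing run measured B faster on the large generated inputs).

-- f"__STR{counter}__"
def pvKey (c : Int) : String := String.ofList ("__STR".toList ++ PySem.Int.toChars c ++ "__".toList)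

-- the ordered phrase replacements (module-level data shared by both programs)
def pvReplacements : List (String × String) :=
  [("is greater than or equal to", ">="),
   ("is less than or equal to", "<="),
   ("is greater than", ">"),
   ("is less than", "<"),
   ("is equals to", "==")]

-- ===== PORT A =====
-- A's inner while: advance until the closing quote; none = unterminated (SyntaxError)
def pvInnerA (q : Char) (acc : List Char) : List Char → Option (List Char × List Char)
  | [] => none
  | x :: xs => if x = q then some (acc, xs) else pvInnerA q (acc ++ [x]) xs

lemma pvInnerA_length (q : Char) : ∀ (l acc v r : List Char),
    pvInnerA q acc l = some (v, r) → r.length < l.length := by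
  intro l
  induction l with
  | nil => intro acc v r h; simp [pvInnerA] at h
  | cons x xs ih =>
    intro acc v r h
    by_cases hx : x = q
    · simp [pvInnerA, hx] at h
      simp [← h.2]
    · simp [pvInnerA, hx] at h
      exact Nat.lt_succ_of_lt (ih _ _ _ h)

-- A's outer while loop (res/placeholders/counter are the loop state); none = SyntaxError
def pvScanA : List Char → List Char → PySem.Dict String String → Int →
    Option (List Char × PySem.Dict String String)
  | [], res, ph, _ => some (res, ph)
  | ch :: rest, res, ph, c =>
    if ch = '"' ∨ ch = '\'' then
      match h : pvInnerA ch [] rest with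
      | none => none
      | some (v, r) =>
        pvScanA r (res ++ (pvKey c).toList) (ph.insert (pvKey c) (String.ofList v)) (c + 1)
    else pvScanA rest (res ++ [ch]) ph c
termination_by l => l.length
decreasing_by
  · exact Nat.lt_succ_of_lt (pvInnerA_length _ _ _ _ _ h)
  · simp

def preprocess_expression (expression : String) : String × (List (String × String)) :=
  match pvScanA expression.toList [] PySem.Dict.empty 0 with
  | none => ("", [])   -- A raises SyntaxError here; these inputs are excluded by Pre_
  | some (res, ph) =>
    (pvReplacements.foldl (fun r p => PySem.Str.replace r p.1 p.2) (String.ofList res), ph.items)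

lemma pvSliceSliceLen (rest : List Char) (j k : Int) (h0 : 0 ≤ j) (hlen : 1 ≤ rest.length) :
    (PySem.List.slice (PySem.List.slice rest (some (j + 1)) none) (some (k + 1)) none).length
      < rest.length := by
  have h1 : PySem.List.slice rest (some (j + 1)) none = rest.drop (j + 1).toNat :=
    PySem.List.slice_from rest (by omega)
  rw [h1, PySem.List.slice_some_none]
  simp only [List.length_drop]
  have := PySem.List.clampIdx_le (rest.drop (j + 1).toNat).length (k + 1)
  omega

-- ===== PORT B =====
-- B's loop: jump to the first quote of either kind with find, then to its closing quote
def pvScanB (rest : List Char) (pieces : List (List Char)) (pairs : List (String × String)) :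
    Option (List (List Char) × List (String × String)) :=
  let d := PySem.Chars.find rest ['"']
  let s := PySem.Chars.find rest ['\'']
  if d = -1 ∧ s = -1 then some (pieces ++ [rest], pairs)
  else
    let j := if s = -1 ∨ (d ≠ -1 ∧ d < s) then d else s
    let q := if s = -1 ∨ (d ≠ -1 ∧ d < s) then '"' else '\''
    let tail := PySem.List.slice rest (some (j + 1)) none
    let k := PySem.Chars.find tail [q]
    if k = -1 then none   -- B raises SyntaxError here too
    else
      let key := pvKey (pairs.length : Int)
      pvScanB (PySem.List.slice tail (some (k + 1)) none)
        (pieces ++ [PySem.List.slice rest none (some j), key.toList])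
        (pairs ++ [(key, String.ofList (PySem.List.slice tail none (some k)))])
termination_by rest.length
decreasing_by
  rename_i hd hk
  have hrest : rest ≠ [] := by
    intro hnil; subst hnil
    exact hd ⟨(PySem.Chars.find_eq_neg_one_iff _ _).mpr (by simp),
              (PySem.Chars.find_eq_neg_one_iff _ _).mpr (by simp)⟩
  have hlen : 1 ≤ rest.length := List.length_pos_iff.mpr hrest
  by_cases hc : PySem.Chars.find rest ['\''] = -1 ∨
      (PySem.Chars.find rest ['"'] ≠ -1 ∧
        PySem.Chars.find rest ['"'] < PySem.Chars.find rest ['\''])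
  · have hdne : PySem.Chars.find rest ['"'] ≠ -1 := by
      rcases hc with h | h
      · exact fun h2 => hd ⟨h2, h⟩
      · exact h.1
    have h0 : 0 ≤ PySem.Chars.find rest ['"'] := by
      have := PySem.Chars.neg_one_le_find rest ['"']; omega
    simp only [dif_pos hc]
    exact pvSliceSliceLen rest _ _ h0 hlen
  · have hsne : PySem.Chars.find rest ['\''] ≠ -1 := by tauto
    have h0 : 0 ≤ PySem.Chars.find rest ['\''] := by
      have := PySem.Chars.neg_one_le_find rest ['\'']; omega
    simp only [dif_neg hc]
    exact pvSliceSliceLen rest _ _ h0 hlen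

def preprocess_expression_alt (expression : String) : String × (List (String × String)) :=
  match pvScanB expression.toList [] [] with
  | none => ("", [])   -- B raises SyntaxError here; excluded by Pre_
  | some (ps, prs) =>
    (pvReplacements.foldl (fun r p => PySem.Str.replace r p.1 p.2)
       (String.ofList (PySem.Chars.join [] ps)), (PySem.Dict.ofList prs).items)

-- ===== PRECONDITION & SPEC =====
-- Pre_ excludes exactly the inputs with an unterminated string literal, on which A
-- raises SyntaxError: every quote character opening a literal must have a matching
-- closing quote of the same kind later in the string.
def pvWellQuoted : Option Char → List Char → Bool
  | none, [] => true
  | some _, [] => false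
  | none, c :: rest =>
    if c = '"' ∨ c = '\'' then pvWellQuoted (some c) rest else pvWellQuoted none rest
  | some q, c :: rest =>
    if c = q then pvWellQuoted none rest else pvWellQuoted (some q) rest

def Pre_preprocess_expression (expression : String) : Prop :=
  pvWellQuoted none expression.toList = true
instance (expression : String) : Decidable (Pre_preprocess_expression expression) := by
  unfold Pre_preprocess_expression; infer_instance

def pvWitness_preprocess_expression : String := "'a' is greater than \"b\""

def Spec_preprocess_expression (expression : String) (out : String × (List (String × String))) : Prop :=
  out = preprocess_expression_alt expression
instance (expression : String) (out : String × (List (String × String))) :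
    Decidable (Spec_preprocess_expression expression out) := by
  unfold Spec_preprocess_expression; infer_instance

-- ===== CLAIM (what is proved, stated in full; the proofs are below) =====
def Claim_equal_preprocess_expression : Prop :=
  ∀ (expression : String), Dom_preprocess_expression expression →
    Pre_preprocess_expression expression →
    Spec_preprocess_expression expression (preprocess_expression expression)

-- ===== LEMMAS AND PROOFS =====

lemma pvSingletonPrefix (q : Char) (t : List Char) : ([q] <+: t) ↔ t.head? = some q := by
  cases t <;> simp [List.cons_prefix_cons, eq_comm]

lemma pvIdxOfSpec (q : Char) : ∀ (l : List Char), q ∈ l →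
    l[l.idxOf q]? = some q ∧ ∀ i, i < l.idxOf q → l[i]? ≠ some q := by
  intro l
  induction l with
  | nil => simp
  | cons x t ih =>
    intro hm
    by_cases hx : x = q
    · subst hx; simp [List.idxOf_cons_self]
    · have hm' : q ∈ t := by
        rcases List.mem_cons.mp hm with h | h
        · exact absurd h.symm hx
        · exact h
      have hix : (x :: t).idxOf q = t.idxOf q + 1 := by
        simp [hx]
      obtain ⟨h1, h2⟩ := ih hm'
      refine ⟨by simpa [hix] using h1, ?_⟩
      intro i hi
      rw [hix] at hi
      cases i with
      | zero => simp [hx]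
      | succ i => simpa using h2 i (by omega)

lemma pvFindSingleton (l : List Char) (q : Char) :
    PySem.Chars.find l [q] = if q ∈ l then ((l.idxOf q : Nat) : Int) else -1 := by
  by_cases hm : q ∈ l
  · have hinf : [q] <:+: l := by
      obtain ⟨a, b, rfl⟩ := List.append_of_mem hm
      exact ⟨a, b, by simp⟩
    have hnn : 0 ≤ PySem.Chars.find l [q] := (PySem.Chars.find_nonneg_iff _ _).mpr hinf
    obtain ⟨hpre, hmin⟩ := PySem.Chars.find_spec hnn
    rw [pvSingletonPrefix, List.head?_drop] at hpre
    obtain ⟨h1, h2⟩ := pvIdxOfSpec q l hm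
    have heq : (PySem.Chars.find l [q]).toNat = l.idxOf q := by
      by_contra hne
      rcases Nat.lt_or_ge (PySem.Chars.find l [q]).toNat (l.idxOf q) with h | h
      · exact h2 _ h hpre
      · have := hmin (l.idxOf q) (by omega)
        rw [pvSingletonPrefix, List.head?_drop] at this
        exact this h1
    simp [hm, ← heq, Int.toNat_of_nonneg hnn]
  · simp only [hm, if_false]
    rw [PySem.Chars.find_eq_neg_one_iff]
    intro hinf
    exact hm (List.singleton_sublist.mp hinf.sublist)

lemma pvMemTakeIdxOf (q : Char) : ∀ (l : List Char) (n : Nat), q ∈ l.take n → l.idxOf q < n := by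
  intro l
  induction l with
  | nil => simp
  | cons x t ih =>
    intro n hm
    cases n with
    | zero => simp at hm
    | succ n =>
      by_cases hx : x = q
      · subst hx; simp [List.idxOf_cons_self]
      · have : q ∈ t.take n := by
          rcases List.mem_cons.mp (by simpa using hm) with h | h
          · exact absurd h.symm hx
          · exact h
        have := ih n this
        simp [hx]
        omega


lemma pvInnerA_eq (q : Char) : ∀ (l acc : List Char),
    pvInnerA q acc l =
      if q ∈ l then some (acc ++ l.take (l.idxOf q), l.drop (l.idxOf q + 1)) else none := by
  intro l
  induction l with
  | nil => intro acc; simp [pvInnerA]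
  | cons x xs ih =>
    intro acc
    by_cases hx : x = q
    · subst hx; simp [pvInnerA, List.idxOf_cons_self]
    · have hne : ¬ q = x := fun h => hx h.symm
      rw [pvInnerA, if_neg hx, ih]
      by_cases hm : q ∈ xs
      · simp [hm, hne, hx, List.take_succ_cons, List.drop_succ_cons]
      · simp [hm, hne]

lemma pvScanA_skip : ∀ (pre t res : List Char) (ph : PySem.Dict String String) (c : Int),
    (∀ x ∈ pre, ¬(x = '"' ∨ x = '\'')) →
    pvScanA (pre ++ t) res ph c = pvScanA t (res ++ pre) ph c := by
  intro pre
  induction pre with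
  | nil => intro t res ph c _; simp
  | cons x xs ih =>
    intro t res ph c h
    have hx : ¬(x = '"' ∨ x = '\'') := h x (by simp)
    rw [List.cons_append, pvScanA, if_neg hx, ih _ _ _ _ (fun y hy => h y (by simp [hy]))]
    simp

lemma pvJoinNil (ps : List (List Char)) : PySem.Chars.join [] ps = ps.flatten := by
  induction ps with
  | nil => rfl
  | cons h t ih =>
    cases t with
    | nil => simp [PySem.Chars.join, List.intercalate]
    | cons a b =>
      simp only [PySem.Chars.join] at *
      simp [List.intercalate] at *
      simp [ih]

lemma pvOfListAppend (pairs : List (String × String)) (x : String × String) :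
    PySem.Dict.ofList (pairs ++ [x]) = (PySem.Dict.ofList pairs).insert x.1 x.2 := by
  show (pairs ++ [x]).foldl (fun d p => d.insert p.1 p.2) PySem.Dict.empty = _
  rw [List.foldl_append]
  rfl


lemma pvCastNeOne (n : Nat) : ((n : Nat) : Int) ≠ -1 := by omega

lemma pvStep (n : Nat) (l : List Char) (hl : l.length ≤ n + 1)
    (pieces : List (List Char)) (pairs : List (String × String)) (q : Char)
    (hq : q = '"' ∨ q = '\'') (hmem : q ∈ l)
    (hpre : ∀ x ∈ l.take (l.idxOf q), ¬(x = '"' ∨ x = '\''))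
    (ih : ∀ (l' : List Char), l'.length ≤ n →
      ∀ (pieces : List (List Char)) (pairs : List (String × String)),
      pvScanA l' pieces.flatten (PySem.Dict.ofList pairs) (pairs.length : Int)
        = Option.map (fun pr => (pr.1.flatten, PySem.Dict.ofList pr.2)) (pvScanB l' pieces pairs)) :
    pvScanA l pieces.flatten (PySem.Dict.ofList pairs) (pairs.length : Int)
      = Option.map (fun pr => (pr.1.flatten, PySem.Dict.ofList pr.2))
          (let tail := PySem.List.slice l (some (((l.idxOf q : Nat) : Int) + 1)) none
           let k := PySem.Chars.find tail [q]
           if k = -1 then none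
           else
             pvScanB (PySem.List.slice tail (some (k + 1)) none)
               (pieces ++ [PySem.List.slice l none (some ((l.idxOf q : Nat) : Int)),
                 (pvKey (pairs.length : Int)).toList])
               (pairs ++ [(pvKey (pairs.length : Int),
                 String.ofList (PySem.List.slice tail none (some k)))])) := by
  have hmlt : l.idxOf q < l.length := List.idxOf_lt_length_of_mem hmem
  have hget : l[l.idxOf q] = q := List.getElem_idxOf hmlt
  have hdecomp : l = l.take (l.idxOf q) ++ q :: l.drop (l.idxOf q + 1) := by
    conv_lhs => rw [← List.take_append_drop (l.idxOf q) l]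
    rw [List.drop_eq_getElem_cons hmlt, hget]
  have htail : PySem.List.slice l (some (((l.idxOf q : Nat) : Int) + 1)) none
      = l.drop (l.idxOf q + 1) := by
    rw [show (((l.idxOf q : Nat) : Int) + 1) = (((l.idxOf q + 1 : Nat)) : Int) by push_cast; ring,
      PySem.List.slice_from_natCast]
  simp only [htail]
  rw [pvFindSingleton]
  conv_lhs => rw [hdecomp]
  rw [pvScanA_skip _ _ _ _ _ hpre, pvScanA, if_pos hq, pvInnerA_eq]
  by_cases hm2 : q ∈ l.drop (l.idxOf q + 1)
  · simp only [hm2, if_true, if_neg (pvCastNeOne _), List.nil_append]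
    split
    next heq =>
      rw [if_pos hm2] at heq
      cases heq
    next v r heq =>
      rw [if_pos hm2] at heq
      injection heq with heq
      injection heq with hv hr
      subst hv; subst hr
      have hsl1 : PySem.List.slice (l.drop (l.idxOf q + 1))
          (some (((l.drop (l.idxOf q + 1)).idxOf q : Int) + 1)) none
          = (l.drop (l.idxOf q + 1)).drop ((l.drop (l.idxOf q + 1)).idxOf q + 1) := by
        rw [show (((l.drop (l.idxOf q + 1)).idxOf q : Int) + 1)
            = (((l.drop (l.idxOf q + 1)).idxOf q + 1 : Nat) : Int) by push_cast; ring,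
          PySem.List.slice_from_natCast]
      have hsl2 : PySem.List.slice l none (some (l.idxOf q : Int)) = l.take (l.idxOf q) :=
        PySem.List.slice_to_natCast _ _
      have hsl3 : PySem.List.slice (l.drop (l.idxOf q + 1)) none
          (some ((l.drop (l.idxOf q + 1)).idxOf q : Int))
          = (l.drop (l.idxOf q + 1)).take ((l.drop (l.idxOf q + 1)).idxOf q) :=
        PySem.List.slice_to_natCast _ _
      rw [hsl1, hsl2, hsl3]
      have hlen' : ((l.drop (l.idxOf q + 1)).drop ((l.drop (l.idxOf q + 1)).idxOf q + 1)).length ≤ n := by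
        simp only [List.length_drop]
        omega
      convert ih _ hlen' (pieces ++ [l.take (l.idxOf q), (pvKey (pairs.length : Int)).toList])
        (pairs ++ [(pvKey (pairs.length : Int),
          String.ofList ((l.drop (l.idxOf q + 1)).take ((l.drop (l.idxOf q + 1)).idxOf q)))]) using 2
      · simp
      · rw [pvOfListAppend]
      · simp
  · simp only [hm2, if_false, Option.map_none, if_pos]
    split
    next heq => rfl
    next v r heq =>
      rw [if_neg hm2] at heq
      cases heq

lemma pvMain : ∀ (n : Nat) (l : List Char), l.length ≤ n →
    ∀ (pieces : List (List Char)) (pairs : List (String × String)),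
    pvScanA l pieces.flatten (PySem.Dict.ofList pairs) (pairs.length : Int)
      = Option.map (fun pr => (pr.1.flatten, PySem.Dict.ofList pr.2)) (pvScanB l pieces pairs) := by
  intro n
  induction n with
  | zero =>
    intro l hl pieces pairs
    have hnil : l = [] := List.eq_nil_of_length_eq_zero (by omega)
    subst hnil
    rw [pvScanB]
    have hf1 : PySem.Chars.find ([] : List Char) ['"'] = -1 := by rw [pvFindSingleton]; simp
    have hf2 : PySem.Chars.find ([] : List Char) ['\''] = -1 := by rw [pvFindSingleton]; simp
    simp [hf1, hf2, pvScanA]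
  | succ n ih =>
    intro l hl pieces pairs
    rw [pvScanB]
    by_cases hterm : PySem.Chars.find l ['"'] = -1 ∧ PySem.Chars.find l ['\''] = -1
    · rw [if_pos hterm]
      have hd : '"' ∉ l := by
        intro hm
        have := hterm.1
        rw [pvFindSingleton, if_pos hm] at this
        omega
      have hs : '\'' ∉ l := by
        intro hm
        have := hterm.2
        rw [pvFindSingleton, if_pos hm] at this
        omega
      have hnoq : ∀ x ∈ l, ¬(x = '"' ∨ x = '\'') := by
        intro x hx h
        rcases h with rfl | rfl
        exacts [hd hx, hs hx]
      have hskip := pvScanA_skip l [] pieces.flatten (PySem.Dict.ofList pairs)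
        (pairs.length : Int) hnoq
      rw [List.append_nil] at hskip
      rw [hskip]
      simp [pvScanA]
    · rw [if_neg hterm]
      by_cases hc : PySem.Chars.find l ['\''] = -1 ∨
          (PySem.Chars.find l ['"'] ≠ -1 ∧ PySem.Chars.find l ['"'] < PySem.Chars.find l ['\''])
      · simp only [if_pos hc]
        have hdne : PySem.Chars.find l ['"'] ≠ -1 := by
          rcases hc with h | h
          · exact fun h2 => hterm ⟨h2, h⟩
          · exact h.1
        have hmem : '"' ∈ l := by
          by_contra h
          rw [pvFindSingleton, if_neg h] at hdne
          exact hdne rfl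
        have hfd : PySem.Chars.find l ['"'] = ((l.idxOf '"' : Nat) : Int) := by
          rw [pvFindSingleton, if_pos hmem]
        have hpre : ∀ x ∈ l.take (l.idxOf '"'), ¬(x = '"' ∨ x = '\'') := by
          intro x hx h
          rcases h with rfl | rfl
          · exact absurd (pvMemTakeIdxOf _ _ _ hx) (lt_irrefl _)
          · have h1 := pvMemTakeIdxOf '\'' l _ hx
            have hm' : '\'' ∈ l := List.mem_of_mem_take hx
            rcases hc with hs1 | ⟨_, hlt⟩
            · rw [pvFindSingleton l '\'', if_pos hm'] at hs1; omega
            · rw [hfd, pvFindSingleton l '\'', if_pos hm'] at hlt; omega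
        rw [hfd]
        exact pvStep n l hl pieces pairs '"' (Or.inl rfl) hmem hpre ih
      · simp only [if_neg hc]
        have hsne : PySem.Chars.find l ['\''] ≠ -1 := fun h => hc (Or.inl h)
        have hmem : '\'' ∈ l := by
          by_contra h
          rw [pvFindSingleton, if_neg h] at hsne
          exact hsne rfl
        have hfs : PySem.Chars.find l ['\''] = ((l.idxOf '\'' : Nat) : Int) := by
          rw [pvFindSingleton, if_pos hmem]
        have hpre : ∀ x ∈ l.take (l.idxOf '\''), ¬(x = '"' ∨ x = '\'') := by
          intro x hx h
          rcases h with rfl | rfl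
          · have h1 := pvMemTakeIdxOf '"' l _ hx
            have hm' : '"' ∈ l := List.mem_of_mem_take hx
            have hdne : PySem.Chars.find l ['"'] ≠ -1 := by
              rw [pvFindSingleton l '"', if_pos hm']
              omega
            have hnlt : ¬ PySem.Chars.find l ['"'] < PySem.Chars.find l ['\''] :=
              fun hlt => hc (Or.inr ⟨hdne, hlt⟩)
            rw [pvFindSingleton l '"', if_pos hm', hfs] at hnlt
            omega
          · exact absurd (pvMemTakeIdxOf _ _ _ hx) (lt_irrefl _)
        rw [hfs]
        exact pvStep n l hl pieces pairs '\'' (Or.inr rfl) hmem hpre ih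


-- ===== VERDICT (by name: the statement is the Claim_ definition above) =====
theorem preprocess_expression_spec : Claim_equal_preprocess_expression := by
  intro e _ _
  unfold Spec_preprocess_expression preprocess_expression preprocess_expression_alt
  have hM := pvMain e.toList.length e.toList le_rfl [] []
  simp only [List.flatten_nil, List.length_nil, Nat.cast_zero] at hM
  have h0 : PySem.Dict.ofList ([] : List (String × String)) = PySem.Dict.empty := rfl
  rw [h0] at hM
  rw [hM]
  cases h : pvScanB e.toList [] [] with
  | none => rfl
  | some pr =>
    simp only [Option.map_some]
    rw [pvJoinNil]
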